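-- pv_equiv track=rewrite | github.com/EasedMango/aw-watcher-windows-and-audio | src/WindowInfo.py | get_visible_region
-- ===== SOURCE A (Python) =====
-- def rect_intersection(rect_a, rect_b):
--     """Return the intersection of two rectangles or None if they don't intersect."""
--     left = max(rect_a[0], rect_b[0])
--     top = max(rect_a[1], rect_b[1])
--     right = min(rect_a[2], rect_b[2])
--     bottom = min(rect_a[3], rect_b[3])
--     if left < right and top < bottom:
--         return (left, top, right, bottom)
--     else:
--         return None
--
-- def rect_union(rect_a, rect_b):
--     """Return the union of two rectangles."""
--     left = min(rect_a[0], rect_b[0])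
--     top = min(rect_a[1], rect_b[1])
--     right = max(rect_a[2], rect_b[2])
--     bottom = max(rect_a[3], rect_b[3])
--     return (left, top, right, bottom)
--
-- def get_visible_region(window_rect, monitors):
--     """Calculate the visible region of a window within the monitor's work areas."""
--     visible_region = None
--     for monitor in monitors:
--         work_area_rect = monitor['work_area_rect']
--         intersection = rect_intersection(window_rect, work_area_rect)
--         if intersection:
--             if visible_region:
--                 visible_region = rect_union(visible_region, intersection)
--             else:
--                 visible_region = intersection
--     return visible_region
-- ===== SOURCE B (Python) =====
-- def get_visible_region(window_rect, monitors):
--     """Divide-and-conquer: recursively split the monitor list in halves, solve each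
--     half, and merge the two optional regions; the merge (bounding-box union) is
--     associative, so this equals the left-to-right accumulation."""
--     def clip(monitor):
--         wa = monitor['work_area_rect']
--         left = max(window_rect[0], wa[0])
--         top = max(window_rect[1], wa[1])
--         right = min(window_rect[2], wa[2])
--         bottom = min(window_rect[3], wa[3])
--         if left < right and top < bottom:
--             return (left, top, right, bottom)
--         return None
--
--     def merge(a, b):
--         if a is None:
--             return b
--         if b is None:
--             return a
--         return (min(a[0], b[0]), min(a[1], b[1]), max(a[2], b[2]), max(a[3], b[3]))
--
--     def solve(ms):
--         if not ms:
--             return None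
--         if len(ms) == 1:
--             return clip(ms[0])
--         mid = len(ms) // 2
--         return merge(solve(ms[:mid]), solve(ms[mid:]))
--
--     return solve(monitors)
-- ===== Notes on version B (the rewrite author's own statement) =====
-- stated objective: alternative
-- what changed: Replaces A's single left-to-right scan with a running Optional-union accumulator by a recursive divide-and-conquer: split the monitor list in halves, solve each half independently, and merge the two optional regions; correctness rests on the associativity of the bounding-box union.
import Mathlib
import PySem

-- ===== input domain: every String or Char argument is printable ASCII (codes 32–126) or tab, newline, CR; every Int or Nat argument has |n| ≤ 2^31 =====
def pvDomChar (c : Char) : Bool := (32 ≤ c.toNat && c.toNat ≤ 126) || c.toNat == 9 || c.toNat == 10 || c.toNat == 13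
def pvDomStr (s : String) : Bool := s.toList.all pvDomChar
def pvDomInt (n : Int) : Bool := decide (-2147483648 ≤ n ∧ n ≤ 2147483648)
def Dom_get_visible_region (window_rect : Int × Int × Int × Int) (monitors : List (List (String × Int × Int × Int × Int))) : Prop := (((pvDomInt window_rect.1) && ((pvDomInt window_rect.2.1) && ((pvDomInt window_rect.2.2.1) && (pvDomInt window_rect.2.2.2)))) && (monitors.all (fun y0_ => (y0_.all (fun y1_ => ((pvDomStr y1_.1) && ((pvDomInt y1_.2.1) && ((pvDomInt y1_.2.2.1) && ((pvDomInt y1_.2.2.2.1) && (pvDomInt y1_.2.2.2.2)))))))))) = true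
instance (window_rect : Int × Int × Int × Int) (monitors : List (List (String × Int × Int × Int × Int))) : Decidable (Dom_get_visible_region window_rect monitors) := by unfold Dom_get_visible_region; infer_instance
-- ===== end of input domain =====

-- B replaces A's left-to-right scan with a running Optional-union accumulator by a
-- recursive divide-and-conquer over the monitor list (split in halves, merge the two
-- optional regions); the bounding-box union is associative, so the results agree.

-- first-match association-list lookup of monitor['work_area_rect'] (Python dict lookup)
def pvLookupWA : List (String × Int × Int × Int × Int) → Option (Int × Int × Int × Int)
  | [] => none
  | (k, r) :: rest => if k = "work_area_rect" then some r else pvLookupWA rest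

-- ===== PORT A =====
def rect_intersection (a b : Int × Int × Int × Int) : Option (Int × Int × Int × Int) :=
  let left := max a.1 b.1
  let top := max a.2.1 b.2.1
  let right := min a.2.2.1 b.2.2.1
  let bottom := min a.2.2.2 b.2.2.2
  if left < right ∧ top < bottom then some (left, top, right, bottom) else none

def rect_union (a b : Int × Int × Int × Int) : Int × Int × Int × Int :=
  (min a.1 b.1, min a.2.1 b.2.1, max a.2.2.1 b.2.2.1, max a.2.2.2 b.2.2.2)

def get_visible_region (window_rect : Int × Int × Int × Int) (monitors : List (List (String × Int × Int × Int × Int))) : Option (Int × Int × Int × Int) :=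
  monitors.foldl (fun visible_region monitor =>
    match pvLookupWA monitor with
    | none => visible_region  -- Python raises KeyError here; excluded by Pre_
    | some work_area_rect =>
      match rect_intersection window_rect work_area_rect with
      | none => visible_region
      | some intersection =>
        match visible_region with
        | some v => some (rect_union v intersection)
        | none => some intersection) none

-- ===== PORT B =====
-- B's clip(monitor): intersect the window with the monitor's work area
def pvClip (w : Int × Int × Int × Int) (monitor : List (String × Int × Int × Int × Int)) : Option (Int × Int × Int × Int) :=
  match pvLookupWA monitor with
  | none => none  -- Python raises KeyError here; excluded by Pre_
  | some wa =>
    let left := max w.1 wa.1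
    let top := max w.2.1 wa.2.1
    let right := min w.2.2.1 wa.2.2.1
    let bottom := min w.2.2.2 wa.2.2.2
    if left < right ∧ top < bottom then some (left, top, right, bottom) else none

-- B's merge(a, b)
def pvMerge : Option (Int × Int × Int × Int) → Option (Int × Int × Int × Int) → Option (Int × Int × Int × Int)
  | none, b => b
  | some a, none => some a
  | some a, some b => some (min a.1 b.1, min a.2.1 b.2.1, max a.2.2.1 b.2.2.1, max a.2.2.2 b.2.2.2)

-- B's solve(ms): divide and conquer on the monitor list
def pvSolve (w : Int × Int × Int × Int) : List (List (String × Int × Int × Int × Int)) → Option (Int × Int × Int × Int)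
  | [] => none
  | [m] => pvClip w m
  | m1 :: m2 :: rest =>
    let ms := m1 :: m2 :: rest
    let mid := ms.length / 2
    pvMerge (pvSolve w (ms.take mid)) (pvSolve w (ms.drop mid))
termination_by ms => ms.length
decreasing_by
  · simp [List.length_take]; omega
  · simp [List.length_drop]; omega

def get_visible_region_alt (window_rect : Int × Int × Int × Int) (monitors : List (List (String × Int × Int × Int × Int))) : Option (Int × Int × Int × Int) :=
  pvSolve window_rect monitors

-- ===== PRECONDITION & SPEC =====
-- Pre_ excludes monitors missing the 'work_area_rect' key, on which Python A raises KeyError.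
def Pre_get_visible_region (window_rect : Int × Int × Int × Int) (monitors : List (List (String × Int × Int × Int × Int))) : Prop :=
  ∀ m ∈ monitors, "work_area_rect" ∈ m.map Prod.fst
instance (window_rect : Int × Int × Int × Int) (monitors : List (List (String × Int × Int × Int × Int))) : Decidable (Pre_get_visible_region window_rect monitors) := by unfold Pre_get_visible_region; infer_instance

def pvWitness_get_visible_region : (Int × Int × Int × Int) × (List (List (String × Int × Int × Int × Int))) :=
  ((0, 0, 10, 10), [[("work_area_rect", 0, 0, 5, 5)], [("work_area_rect", 3, 3, 8, 8)]])

def Spec_get_visible_region (window_rect : Int × Int × Int × Int) (monitors : List (List (String × Int × Int × Int × Int))) (out : Option (Int × Int × Int × Int)) : Prop := out = get_visible_region_alt window_rect monitors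
instance (window_rect : Int × Int × Int × Int) (monitors : List (List (String × Int × Int × Int × Int))) (out : Option (Int × Int × Int × Int)) : Decidable (Spec_get_visible_region window_rect monitors out) := by unfold Spec_get_visible_region; infer_instance

-- ===== CLAIM (what is proved, stated in full; the proofs are below) =====
def Claim_equal_get_visible_region : Prop := ∀ (window_rect : Int × Int × Int × Int) (monitors : List (List (String × Int × Int × Int × Int))), Dom_get_visible_region window_rect monitors → Pre_get_visible_region window_rect monitors → Spec_get_visible_region window_rect monitors (get_visible_region window_rect monitors)

-- ===== LEMMAS AND PROOFS =====

-- A's fold as a fold of pvMerge of per-monitor clips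
def pvScan (w : Int × Int × Int × Int) (a : Option (Int × Int × Int × Int)) (ms : List (List (String × Int × Int × Int × Int))) : Option (Int × Int × Int × Int) :=
  ms.foldl (fun acc m => pvMerge acc (pvClip w m)) a

theorem merge_none_right (a : Option (Int × Int × Int × Int)) : pvMerge a none = a := by
  cases a <;> rfl

theorem merge_assoc (a b c : Option (Int × Int × Int × Int)) :
    pvMerge (pvMerge a b) c = pvMerge a (pvMerge b c) := by
  cases a <;> cases b <;> cases c <;>
    simp [pvMerge, min_assoc, max_assoc]

theorem merge_match (acc o : Option (Int × Int × Int × Int)) :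
    (match o with
     | none => acc
     | some intersection =>
       match acc with
       | some v => some (rect_union v intersection)
       | none => some intersection) = pvMerge acc o := by
  cases o <;> cases acc <;> simp [pvMerge, rect_union]

-- A's step function equals merging the clip into the accumulator
theorem stepA_eq (w : Int × Int × Int × Int) (acc : Option (Int × Int × Int × Int))
    (m : List (String × Int × Int × Int × Int)) :
    (match pvLookupWA m with
     | none => acc
     | some work_area_rect =>
       match rect_intersection w work_area_rect with
       | none => acc
       | some intersection =>
         match acc with
         | some v => some (rect_union v intersection)
         | none => some intersection) = pvMerge acc (pvClip w m) := by
  cases h : pvLookupWA m with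
  | none => simp only [pvClip, h]; exact (merge_none_right acc).symm
  | some wa =>
    simp only [pvClip, h]
    exact merge_match acc (rect_intersection w wa)

theorem get_visible_region_eq_scan (w : Int × Int × Int × Int)
    (ms : List (List (String × Int × Int × Int × Int))) :
    get_visible_region w ms = pvScan w none ms := by
  unfold get_visible_region pvScan
  congr 1
  funext acc m
  exact stepA_eq w acc m

theorem scan_init (w : Int × Int × Int × Int) (a : Option (Int × Int × Int × Int))
    (ms : List (List (String × Int × Int × Int × Int))) :
    pvScan w a ms = pvMerge a (pvScan w none ms) := by
  induction ms generalizing a with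
  | nil => exact (merge_none_right a).symm
  | cons m rest ih =>
    simp only [pvScan, List.foldl_cons] at *
    rw [ih (pvMerge a (pvClip w m)), ih (pvMerge none (pvClip w m)), merge_assoc]
    rfl

theorem scan_append (w : Int × Int × Int × Int)
    (l1 l2 : List (List (String × Int × Int × Int × Int))) :
    pvScan w none (l1 ++ l2) = pvMerge (pvScan w none l1) (pvScan w none l2) := by
  unfold pvScan
  rw [List.foldl_append]
  exact scan_init w _ l2

theorem solve_eq_scan (w : Int × Int × Int × Int)
    (ms : List (List (String × Int × Int × Int × Int))) :
    pvSolve w ms = pvScan w none ms := by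
  fun_induction pvSolve w ms with
  | case1 => simp [pvScan]
  | case2 m => simp [pvScan, pvMerge]
  | case3 m1 m2 rest ms mid ih1 ih2 =>
    rw [ih1, ih2, ← scan_append, List.take_append_drop]

-- ===== VERDICT (by name: the statement is the Claim_ definition above) =====
theorem get_visible_region_spec : Claim_equal_get_visible_region := by
  intro w ms _ _
  show get_visible_region w ms = get_visible_region_alt w ms
  rw [get_visible_region_eq_scan, get_visible_region_alt, solve_eq_scan]
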